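-- pv_equiv track=rewrite | github.com/Cloudy680/mms-12-2025 | mankewich/lab1.py | findSeries
-- ===== SOURCE A (Python) =====
-- def findSeries(tosses, seriesLength=5):
--     maxSeries = 0
--     currentSeries = 0
--
--     for result in tosses:
--         if result == 1:  # орел
--             currentSeries += 1
--             if currentSeries > maxSeries:
--                 maxSeries = currentSeries
--         else:  # решка
--             currentSeries = 0
--
--     hasSeries = maxSeries >= seriesLength
--     return hasSeries, maxSeries
-- ===== SOURCE B (Python) =====
-- def findSeries(tosses, seriesLength=5):
--     # runs-based: split into maximal runs of equal values, keep lengths of 1-runs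
--     tosses = list(tosses)
--     runs = []
--     i, n = 0, len(tosses)
--     while i < n:
--         j = i
--         while j < n and tosses[j] == tosses[i]:
--             j += 1
--         if tosses[i] == 1:
--             runs.append(j - i)
--         i = j
--     maxSeries = max(runs, default=0)
--     return maxSeries >= seriesLength, maxSeries
-- ===== Notes on version B (the rewrite author's own statement) =====
-- stated objective: alternative
-- what changed: B decomposes the sequence into maximal runs of equal values, collects the lengths of runs of 1s and takes their max, instead of threading a reset counter element by element.
import Mathlib
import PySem

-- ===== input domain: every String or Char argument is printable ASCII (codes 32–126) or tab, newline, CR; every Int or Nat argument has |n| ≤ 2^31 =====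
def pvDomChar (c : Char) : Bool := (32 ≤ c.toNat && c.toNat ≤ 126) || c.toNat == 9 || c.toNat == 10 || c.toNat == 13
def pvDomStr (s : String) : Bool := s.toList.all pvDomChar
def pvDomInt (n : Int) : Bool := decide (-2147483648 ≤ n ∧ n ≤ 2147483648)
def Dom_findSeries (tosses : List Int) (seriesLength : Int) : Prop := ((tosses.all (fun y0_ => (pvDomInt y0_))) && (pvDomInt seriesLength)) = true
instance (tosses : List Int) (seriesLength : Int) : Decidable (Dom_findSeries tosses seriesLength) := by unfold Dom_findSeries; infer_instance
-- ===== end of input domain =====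

-- ===== PORT A =====
-- B restructures A's reset-counter scan as a decomposition into maximal runs; return value only.
def findSeries (tosses : List Int) (seriesLength : Int) : Bool × Int :=
  let st := tosses.foldl
    (fun (p : Int × Int) r =>
      if r = 1 then
        let c := p.2 + 1
        (if c > p.1 then c else p.1, c)
      else (p.1, 0)) (0, 0)
  (decide (st.1 ≥ seriesLength), st.1)

-- ===== PORT B =====
-- collect the lengths of the maximal runs of 1s (B's outer/inner while loops over runs)
def collectRuns : List Int → List Int
  | [] => []
  | x :: xs =>
    let run : Int := 1 + (xs.takeWhile (fun y => y = x)).length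
    let rest := xs.dropWhile (fun y => y = x)
    if x = 1 then run :: collectRuns rest else collectRuns rest
termination_by xs => xs.length
decreasing_by all_goals exact Nat.lt_succ_of_le (List.length_dropWhile_le _ _)

def findSeries_alt (tosses : List Int) (seriesLength : Int) : Bool × Int :=
  let runs := collectRuns tosses
  let maxSeries := (PySem.List.max? runs (fun y => y)).getD 0   -- max(runs, default=0)
  (decide (maxSeries ≥ seriesLength), maxSeries)

-- ===== PRECONDITION & SPEC =====
def Spec_findSeries (tosses : List Int) (seriesLength : Int) (out : Bool × Int) : Prop := out = findSeries_alt tosses seriesLength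
instance (tosses : List Int) (seriesLength : Int) (out : Bool × Int) : Decidable (Spec_findSeries tosses seriesLength out) := by unfold Spec_findSeries; infer_instance

-- ===== CLAIM (what is proved, stated in full; the proofs are below) =====
def Claim_equal_findSeries : Prop := ∀ (tosses : List Int) (seriesLength : Int), Dom_findSeries tosses seriesLength → Spec_findSeries tosses seriesLength (findSeries tosses seriesLength)

-- ===== LEMMAS AND PROOFS =====

-- "best run with carry": max 1-run length where the leading run of 1s is extended by c
def bwc : Int → List Int → Int
  | c, [] => c
  | c, x :: xs => if x = 1 then bwc (c + 1) xs else max c (bwc 0 xs)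

lemma bwc_ge (xs : List Int) : ∀ c : Int, c ≤ bwc c xs := by
  induction xs with
  | nil => intro c; simp [bwc]
  | cons x t ih =>
    intro c
    by_cases h : x = 1
    · simp only [bwc, h, if_true]
      exact le_trans (by omega) (ih (c + 1))
    · simp only [bwc, if_neg h]
      exact le_max_left _ _

lemma foldA (xs : List Int) : ∀ m c : Int, 0 ≤ c → c ≤ m →
    (List.foldl (fun (p : Int × Int) r =>
      if r = 1 then (if p.2 + 1 > p.1 then p.2 + 1 else p.1, p.2 + 1) else (p.1, 0))
      (m, c) xs).1 = max m (bwc c xs) := by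
  induction xs with
  | nil => intro m c _ h2; simp [bwc]; omega
  | cons x t ih =>
    intro m c h1 h2
    by_cases h : x = 1
    · subst h
      rw [List.foldl_cons]
      simp only [reduceIte]
      have hstep : (if c + 1 > m then c + 1 else m) = max m (c + 1) := by omega
      rw [hstep, ih (max m (c + 1)) (c + 1) (by omega) (le_max_right _ _)]
      have hb := bwc_ge t (c + 1)
      have hbw : bwc c (1 :: t) = bwc (c + 1) t := by simp [bwc]
      rw [hbw]
      omega
    · rw [List.foldl_cons]
      simp only [if_neg h]
      rw [ih m 0 le_rfl (le_trans h1 h2)]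
      have hb := bwc_ge t (0 : Int)
      have hbw : bwc c (x :: t) = max c (bwc 0 t) := by simp [bwc, h]
      rw [hbw]
      omega

lemma maxFoldl (l : List Int) : ∀ a b : Int, List.foldl max (max a b) l = max a (List.foldl max b l) := by
  induction l with
  | nil => intro a b; simp
  | cons x t ih =>
    intro a b
    simp only [List.foldl]
    rw [max_assoc, ih a (max b x)]

lemma collectRuns_pos : ∀ xs : List Int, ∀ r ∈ collectRuns xs, 1 ≤ r := by
  intro xs
  induction xs using collectRuns.induct with
  | case1 => simp [collectRuns]
  | case2 t _rest ih =>
    intro r hr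
    simp only [collectRuns, reduceIte] at hr
    rcases List.mem_cons.1 hr with h' | h'
    · subst h'
      have := Int.natCast_nonneg (t.takeWhile (fun y => decide (y = 1))).length
      omega
    · exact ih r h'
  | case3 x t _rest h ih =>
    intro r hr
    simp only [collectRuns, if_neg h] at hr
    exact ih r hr

lemma maxD_eq_foldl (l : List Int) (h : ∀ r ∈ l, 1 ≤ r) :
    (PySem.List.max? l (fun y => y)).getD 0 = List.foldl max 0 l := by
  cases l with
  | nil => simp [PySem.List.max?]
  | cons x t =>
    rw [PySem.List.max?_id_cons]
    simp only [Option.getD_some, List.foldl]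
    have hx : (1 : Int) ≤ x := h x (List.mem_cons_self ..)
    have : max (0 : Int) x = x := by omega
    rw [this]

lemma bwc_drop_ne1 (x : Int) (hx : ¬ x = 1) :
    ∀ xs : List Int, bwc 0 (xs.dropWhile (fun y => y = x)) = bwc 0 xs := by
  intro xs
  induction xs with
  | nil => simp
  | cons y t ih =>
    by_cases hy : y = x
    · have hd : (y :: t).dropWhile (fun y => decide (y = x)) = t.dropWhile (fun y => decide (y = x)) := by
        simp [List.dropWhile, hy]
      rw [hd, ih]
      have hb := bwc_ge t (0 : Int)
      have hy1 : ¬ y = 1 := by rw [hy]; exact hx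
      simp only [bwc, if_neg hy1]
      omega
    · have hd : (y :: t).dropWhile (fun y => decide (y = x)) = y :: t := by
        simp [List.dropWhile, hy]
      rw [hd]

lemma bwc_take_drop : ∀ (xs : List Int) (c : Int),
    bwc c xs = bwc (c + ((xs.takeWhile (fun y => y = 1)).length : Int)) (xs.dropWhile (fun y => y = 1)) := by
  intro xs
  induction xs with
  | nil => intro c; simp
  | cons y t ih =>
    intro c
    by_cases hy : y = 1
    · have ht : (y :: t).takeWhile (fun y => decide (y = 1)) = y :: t.takeWhile (fun y => decide (y = 1)) := by
        simp [List.takeWhile, hy]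
      have hd : (y :: t).dropWhile (fun y => decide (y = 1)) = t.dropWhile (fun y => decide (y = 1)) := by
        simp [List.dropWhile, hy]
      rw [ht, hd]
      have : bwc c (y :: t) = bwc (c + 1) t := by simp [bwc, hy]
      rw [this, ih (c + 1)]
      congr 1
      simp only [List.length_cons]
      push_cast
      ring
    · have ht : (y :: t).takeWhile (fun y => decide (y = 1)) = [] := by
        simp [List.takeWhile, hy]
      have hd : (y :: t).dropWhile (fun y => decide (y = 1)) = y :: t := by
        simp [List.dropWhile, hy]
      rw [ht, hd]
      simp

lemma bwc_stop : ∀ (xs : List Int) (a : Int), 0 ≤ a →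
    bwc a (xs.dropWhile (fun y => y = 1)) = max a (bwc 0 (xs.dropWhile (fun y => y = 1))) := by
  intro xs
  induction xs with
  | nil => intro a ha; simp [bwc]; omega
  | cons y t ih =>
    intro a ha
    by_cases hy : y = 1
    · have hd : (y :: t).dropWhile (fun y => decide (y = 1)) = t.dropWhile (fun y => decide (y = 1)) := by
        simp [List.dropWhile, hy]
      rw [hd]; exact ih a ha
    · have hd : (y :: t).dropWhile (fun y => decide (y = 1)) = y :: t := by
        simp [List.dropWhile, hy]
      rw [hd]
      have hb := bwc_ge t (0 : Int)
      simp only [bwc, if_neg hy]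
      omega

lemma mainG : ∀ xs : List Int, List.foldl max 0 (collectRuns xs) = bwc 0 xs := by
  intro xs
  induction xs using collectRuns.induct with
  | case1 => simp [collectRuns, bwc]
  | case2 t _rest ih =>
    simp only [collectRuns, reduceIte]
    rw [List.foldl_cons]
    have hk0 : (0 : Int) ≤ ((t.takeWhile (fun y => decide (y = 1))).length : Int) :=
      Int.natCast_nonneg _
    have h1 : max (0 : Int) (1 + ((t.takeWhile (fun y => decide (y = 1))).length : Int)) =
        max (1 + ((t.takeWhile (fun y => decide (y = 1))).length : Int)) 0 := max_comm _ _
    rw [h1, maxFoldl, ih]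
    have h2 : bwc 0 ((1 : Int) :: t) = bwc 1 t := by simp [bwc]
    rw [h2, bwc_take_drop t 1,
      bwc_stop t (1 + ((t.takeWhile (fun y => decide (y = 1))).length : Int)) (by omega)]
  | case3 x t _rest h ih =>
    simp only [collectRuns, if_neg h]
    rw [ih, bwc_drop_ne1 x h t]
    have hb := bwc_ge t (0 : Int)
    have hbw : bwc 0 (x :: t) = max 0 (bwc 0 t) := by simp [bwc, h]
    rw [hbw]
    omega

-- ===== VERDICT (by name: the statement is the Claim_ definition above) =====
theorem findSeries_spec : Claim_equal_findSeries := by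
  intro tosses seriesLength _
  unfold Spec_findSeries findSeries findSeries_alt
  have hM : (PySem.List.max? (collectRuns tosses) (fun y => y)).getD 0 = bwc 0 tosses := by
    rw [maxD_eq_foldl _ (collectRuns_pos tosses), mainG]
  have hA : (List.foldl (fun (p : Int × Int) r =>
      if r = 1 then (if p.2 + 1 > p.1 then p.2 + 1 else p.1, p.2 + 1) else (p.1, 0))
      ((0 : Int), (0 : Int)) tosses).1 = bwc 0 tosses := by
    rw [foldA tosses 0 0 le_rfl le_rfl]
    have hb := bwc_ge tosses (0 : Int)
    omega
  simp only []
  rw [hA, hM]
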